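-- pv_equiv track=rewrite | github.com/Tjarke/Codewars_challenges | 5kyu_Chess_Fun_7_Chess_Triangle.py | chess_triangle
-- ===== SOURCE A (Python) =====
-- def chess_triangle(n, m):
--     total_pos = 0
--     for x in range(n):
--         for y in range(m):
--             pos_hors = (x,y)
--             scnd_piece = [(x+2,y+1), (x+1,y+2),
--                           (x-1,y+2), (x-2,y+1),
--                           (x-2,y-1), (x-1,y-2),
--                           (x+1,y-2), (x+2,y-1)]
--             allowed = [pos for pos in scnd_piece if pos[0] < n and pos[0] >= 0
--                        and pos[1] < m and pos[1] >= 0]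
--             for pos_rook in allowed:
--                 for b_x in range(n):
--                     b_y = pos_rook[1]
--                     pos_bish = (b_x,b_y)
--                     if abs(pos_bish[0]-pos_hors[0]) == abs(pos_bish[1]-pos_hors[1]):
--                         total_pos += 1
--                 for b_y in range(m):
--                     b_x = pos_rook[0]
--                     pos_bish = (b_x,b_y)
--                     if abs(pos_bish[0]-pos_hors[0]) == abs(pos_bish[1]-pos_hors[1]):
--                         total_pos += 1
--
--             for pos_bish in allowed:
--                 b_x = pos_bish[0]
--                 b_y = pos_bish[1]
--                 thrd_piece = [(b_x+1,b_y+1), (b_x+2,b_y+2),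
--                               (b_x-1,b_y+1), (b_x-2,b_y+2),
--                               (b_x-1,b_y-1), (b_x-2,b_y-2),
--                               (b_x+1,b_y-1), (b_x+2,b_y-2)]
--                 allowed =  [pos for pos in thrd_piece if pos[0] < n and pos[0] >= 0
--                        and pos[1] < m and pos[1] >= 0]
--                 for pos_rook in allowed:
--                     if pos_rook[0] == pos_hors[0] or pos_rook[1] == pos_hors[1]:
--                         total_pos += 1
--     return total_pos
-- ===== SOURCE B (Python) =====
-- KNIGHT = [(2, 1), (1, 2), (-1, 2), (-2, 1), (-2, -1), (-1, -2), (1, -2), (2, -1)]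
-- BISHOP = [(1, 1), (2, 2), (-1, 1), (-2, 2), (-1, -1), (-2, -2), (1, -1), (2, -2)]
--
--
-- def chess_triangle(n, m):
--     total = 0
--     for x in range(n):
--         for y in range(m):
--             for dx, dy in KNIGHT:
--                 rx, ry = x + dx, y + dy
--                 if 0 <= rx < n and 0 <= ry < m:
--                     # rook at (rx, ry): bishops attacking the knight on column ry
--                     # sit at x - |dy| or x + |dy| (|dy| in {1, 2}), and on row rx
--                     # at y - |dx| or y + |dx| -- O(1) instead of scanning ranges
--                     d = abs(ry - y)
--                     total += (0 <= x - d < n) + (0 <= x + d < n)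
--                     e = abs(rx - x)
--                     total += (0 <= y - e < m) + (0 <= y + e < m)
--                     # bishop at (rx, ry): rooks one diagonal step (1 or 2) away
--                     # that share a row or column with the knight
--                     for ex, ey in BISHOP:
--                         tx, ty = rx + ex, ry + ey
--                         if 0 <= tx < n and 0 <= ty < m and (tx == x or ty == y):
--                             total += 1
--     return total
-- ===== Notes on version B (the rewrite author's own statement) =====
-- stated objective: faster
-- what changed: Replaces A's two inner scans over range(n) and range(m) (counting bishops on the rook's row/column that attack the knight) with O(1) arithmetic -- the attacking bishop can only sit at x±|dy| / y±|dx| -- and fuses A's two passes over the knight-move squares into one loop over fixed offset tables.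
import Mathlib
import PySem

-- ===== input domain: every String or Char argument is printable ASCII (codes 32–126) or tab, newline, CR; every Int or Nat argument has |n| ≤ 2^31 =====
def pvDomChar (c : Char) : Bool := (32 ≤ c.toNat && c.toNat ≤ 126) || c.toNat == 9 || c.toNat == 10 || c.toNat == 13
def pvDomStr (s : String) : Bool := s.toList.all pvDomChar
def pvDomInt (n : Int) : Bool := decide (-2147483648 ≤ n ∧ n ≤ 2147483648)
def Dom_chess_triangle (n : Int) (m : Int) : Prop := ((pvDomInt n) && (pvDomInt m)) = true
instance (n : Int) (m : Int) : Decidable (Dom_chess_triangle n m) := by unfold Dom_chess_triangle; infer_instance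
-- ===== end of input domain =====

-- B replaces A's inner scans over range(n)/range(m) by O(1) arithmetic (the attacking
-- bishop can only sit at x±|dy| / y±|dx|) and fuses A's two passes over the knight-move
-- squares into one loop over offset tables: O(n*m) loop steps instead of O(n*m*(n+m)).

-- ===== PORT A =====
-- the board-bounds test of A's two list comprehensions, in A's condition order
def ctA_bounds (n : Int) (m : Int) (p : Int × Int) : Bool :=
  decide (p.1 < n) && decide (p.1 ≥ 0) && decide (p.2 < m) && decide (p.2 ≥ 0)

-- scnd_piece
def ctA_scnd (x : Int) (y : Int) : List (Int × Int) :=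
  [(x+2,y+1), (x+1,y+2), (x-1,y+2), (x-2,y+1), (x-2,y-1), (x-1,y-2), (x+1,y-2), (x+2,y-1)]

-- thrd_piece
def ctA_thrd (pb : Int × Int) : List (Int × Int) :=
  [(pb.1+1,pb.2+1), (pb.1+2,pb.2+2), (pb.1-1,pb.2+1), (pb.1-2,pb.2+2),
   (pb.1-1,pb.2-1), (pb.1-2,pb.2-2), (pb.1+1,pb.2-1), (pb.1+2,pb.2-2)]

-- body of A's 'for pos_rook in allowed' loop (the two range scans)
def ctA_inner1 (n : Int) (m : Int) (x : Int) (y : Int) (total : Int) (pr : Int × Int) : Int :=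
  let total := (PySem.List.pyRange 0 n 1).foldl (fun total bx =>
    if |bx - x| = |pr.2 - y| then total + 1 else total) total
  (PySem.List.pyRange 0 m 1).foldl (fun total by_ =>
    if |pr.1 - x| = |by_ - y| then total + 1 else total) total

-- body of A's 'for pos_bish in allowed' loop (the reassignment of 'allowed' inside it
-- does not affect the list Python iterates, captured at loop entry)
def ctA_inner2 (n : Int) (m : Int) (x : Int) (y : Int) (total : Int) (pb : Int × Int) : Int :=
  ((ctA_thrd pb).filter (ctA_bounds n m)).foldl (fun total pr =>
    if pr.1 = x ∨ pr.2 = y then total + 1 else total) total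

-- body of A's 'for y in range(m)' loop (pos_hors = (x,y)); 'allowed' written out at
-- both of its two uses
def ctA_cell (n : Int) (m : Int) (x : Int) (y : Int) (total0 : Int) : Int :=
  ((ctA_scnd x y).filter (ctA_bounds n m)).foldl (ctA_inner2 n m x y)
    (((ctA_scnd x y).filter (ctA_bounds n m)).foldl (ctA_inner1 n m x y) total0)

def chess_triangle (n : Int) (m : Int) : Int :=
  (PySem.List.pyRange 0 n 1).foldl (fun total x =>
    (PySem.List.pyRange 0 m 1).foldl (fun total y =>
      ctA_cell n m x y total) total) 0

-- ===== PORT B =====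
def ctKnight : List (Int × Int) := [(2,1), (1,2), (-1,2), (-2,1), (-2,-1), (-1,-2), (1,-2), (2,-1)]
def ctBishop : List (Int × Int) := [(1,1), (2,2), (-1,1), (-2,2), (-1,-1), (-2,-2), (1,-1), (2,-2)]

-- the body of B's 'for dx, dy in KNIGHT' loop (bool + bool ports as 0/1 ifs)
def ctB_step (n : Int) (m : Int) (x : Int) (y : Int) (total : Int) (d : Int × Int) : Int :=
  let rx := x + d.1
  let ry := y + d.2
  if 0 ≤ rx ∧ rx < n ∧ 0 ≤ ry ∧ ry < m then
    let dd := |ry - y|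
    let total := total + (if 0 ≤ x - dd ∧ x - dd < n then (1:Int) else 0)
                       + (if 0 ≤ x + dd ∧ x + dd < n then (1:Int) else 0)
    let ee := |rx - x|
    let total := total + (if 0 ≤ y - ee ∧ y - ee < m then (1:Int) else 0)
                       + (if 0 ≤ y + ee ∧ y + ee < m then (1:Int) else 0)
    ctBishop.foldl (fun total e =>
      let tx := rx + e.1
      let ty := ry + e.2
      if 0 ≤ tx ∧ tx < n ∧ 0 ≤ ty ∧ ty < m ∧ (tx = x ∨ ty = y) then total + 1 else total) total
  else total

def ctB_cell (n : Int) (m : Int) (x : Int) (y : Int) (total0 : Int) : Int :=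
  ctKnight.foldl (ctB_step n m x y) total0

def chess_triangle_alt (n : Int) (m : Int) : Int :=
  (PySem.List.pyRange 0 n 1).foldl (fun total x =>
    (PySem.List.pyRange 0 m 1).foldl (fun total y =>
      ctB_cell n m x y total) total) 0

-- ===== PRECONDITION & SPEC =====
def Spec_chess_triangle (n : Int) (m : Int) (out : Int) : Prop := out = chess_triangle_alt n m
instance (n : Int) (m : Int) (out : Int) : Decidable (Spec_chess_triangle n m out) := by unfold Spec_chess_triangle; infer_instance

-- ===== CLAIM (what is proved, stated in full; the proofs are below) =====
def Claim_equal_chess_triangle : Prop := ∀ (n : Int) (m : Int), Dom_chess_triangle n m → Spec_chess_triangle n m (chess_triangle n m)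

-- ===== LEMMAS AND PROOFS =====

-- counting loop 'if P then total+1 else total' is a countP
lemma foldl_len {α : Type} (l : List α) (t : Int) :
    l.foldl (fun acc _ => acc + 1) t = t + l.length := by
  induction l generalizing t with
  | nil => simp
  | cons a l ih => simp [List.foldl_cons, ih]; omega

lemma foldl_ite_count {α : Type} (P : α → Prop) [DecidablePred P] (l : List α) (t : Int) :
    l.foldl (fun tot e => if P e then tot + 1 else tot) t
      = t + (l.countP (fun e => decide (P e)) : Int) := by
  rw [PySem.List.foldl_ite_eq_foldl_filter, foldl_len, List.countP_eq_length_filter]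

-- countP of a two-point predicate
lemma countP_pair (a b : Int) (h : a ≠ b) (l : List Int) :
    l.countP (fun v => decide (v = a ∨ v = b)) = l.count a + l.count b := by
  induction l with
  | nil => simp
  | cons c l ih =>
    simp only [List.countP_cons, List.count_cons, ih]
    by_cases hca : c = a <;> by_cases hcb : c = b <;> simp_all <;> omega

lemma count_pyRange (n a : Int) :
    (PySem.List.pyRange 0 n 1).count a = if 0 ≤ a ∧ a < n then 1 else 0 := by
  by_cases h : 0 ≤ a ∧ a < n
  · simp [h, List.count_eq_one_of_mem (PySem.List.nodup_pyRange_one 0 n)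
      (PySem.List.mem_pyRange_one.mpr h)]
  · simp [h, List.count_eq_zero_of_not_mem (fun hm => h (PySem.List.mem_pyRange_one.mp hm))]

-- A's scan over range(n) counting |i - x| == |c| equals the two-indicator arithmetic (c ≠ 0)
set_option maxRecDepth 8192 in
lemma foldl_count_abs (n x c t : Int) (hc : c ≠ 0) :
    (PySem.List.pyRange 0 n 1).foldl (fun tot i => if |i - x| = |c| then tot + 1 else tot) t
      = t + ((if 0 ≤ x - |c| ∧ x - |c| < n then (1:Int) else 0)
           + (if 0 ≤ x + |c| ∧ x + |c| < n then (1:Int) else 0)) := by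
  rw [foldl_ite_count]
  have habs : ∀ i : Int, (|i - x| = |c|) ↔ (i = x - |c| ∨ i = x + |c|) := by
    intro i
    rw [abs_eq (abs_nonneg c)]
    constructor <;> intro h <;> omega
  have hpos : 0 < |c| := abs_pos.mpr hc
  rw [List.countP_congr (q := fun v => decide (v = x - |c| ∨ v = x + |c|))
    (fun i _ => by simp only [decide_eq_true_eq]; exact habs i)]
  rw [countP_pair _ _ (by omega), count_pyRange, count_pyRange]
  split_ifs <;> norm_num

-- the flipped-equation version used by A's scan over range(m)
lemma foldl_count_abs' (m y c t : Int) (hc : c ≠ 0) :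
    (PySem.List.pyRange 0 m 1).foldl (fun tot i => if |c| = |i - y| then tot + 1 else tot) t
      = t + ((if 0 ≤ y - |c| ∧ y - |c| < m then (1:Int) else 0)
           + (if 0 ≤ y + |c| ∧ y + |c| < m then (1:Int) else 0)) := by
  have : (fun (tot : Int) (i : Int) => if |c| = |i - y| then tot + 1 else tot)
       = (fun (tot : Int) (i : Int) => if |i - y| = |c| then tot + 1 else tot) := by
    funext tot i
    rcases eq_or_ne (|i - y|) (|c|) with h | h
    · rw [if_pos h, if_pos h.symm]
    · rw [if_neg h, if_neg (fun hh => h hh.symm)]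
  rw [this, foldl_count_abs m y c t hc]

-- A's per-knight-move contributions, as pure functions of the move square
def gA1 (n m x y : Int) (pr : Int × Int) : Int :=
  ((if 0 ≤ x - |pr.2 - y| ∧ x - |pr.2 - y| < n then (1:Int) else 0)
 + (if 0 ≤ x + |pr.2 - y| ∧ x + |pr.2 - y| < n then (1:Int) else 0))
 + ((if 0 ≤ y - |pr.1 - x| ∧ y - |pr.1 - x| < m then (1:Int) else 0)
 + (if 0 ≤ y + |pr.1 - x| ∧ y + |pr.1 - x| < m then (1:Int) else 0))

def gA2 (n m x y : Int) (pb : Int × Int) : Int :=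
  (((ctA_thrd pb).filter (ctA_bounds n m)).countP (fun pr => decide (pr.1 = x ∨ pr.2 = y)) : Int)

-- B's per-knight-move contribution
def gB (n m x y : Int) (d : Int × Int) : Int :=
  gA1 n m x y (x + d.1, y + d.2)
  + (ctBishop.countP (fun e => decide (0 ≤ x + d.1 + e.1 ∧ x + d.1 + e.1 < n ∧
      0 ≤ y + d.2 + e.2 ∧ y + d.2 + e.2 < m ∧ (x + d.1 + e.1 = x ∨ y + d.2 + e.2 = y))) : Int)

-- inside-the-board test, as B writes it
def pB (n m x y : Int) (d : Int × Int) : Bool :=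
  decide (0 ≤ x + d.1 ∧ x + d.1 < n ∧ 0 ≤ y + d.2 ∧ y + d.2 < m)

lemma hstep (n m x y : Int) (tot : Int) (d : Int × Int) :
    ctB_step n m x y tot d = if pB n m x y d then tot + gB n m x y d else tot := by
  unfold ctB_step pB
  have hb : ∀ tot0 : Int, ctBishop.foldl (fun total e =>
      if 0 ≤ x + d.1 + e.1 ∧ x + d.1 + e.1 < n ∧ 0 ≤ y + d.2 + e.2 ∧ y + d.2 + e.2 < m ∧
          (x + d.1 + e.1 = x ∨ y + d.2 + e.2 = y) then total + 1 else total) tot0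
      = tot0 + (ctBishop.countP (fun e => decide (0 ≤ x + d.1 + e.1 ∧ x + d.1 + e.1 < n ∧
          0 ≤ y + d.2 + e.2 ∧ y + d.2 + e.2 < m ∧ (x + d.1 + e.1 = x ∨ y + d.2 + e.2 = y))) : Int) :=
    fun tot0 => foldl_ite_count _ _ _
  simp only [decide_eq_true_eq]
  rw [hb]
  refine if_congr Iff.rfl ?_ rfl
  unfold gB gA1
  dsimp only
  omega

lemma knight_mem_ne (x y : Int) (pr : Int × Int) (h : pr ∈ ctA_scnd x y) :
    pr.2 - y ≠ 0 ∧ pr.1 - x ≠ 0 := by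
  simp only [ctA_scnd, List.mem_cons, List.not_mem_nil, or_false] at h
  rcases h with h|h|h|h|h|h|h|h <;> subst h <;>
    exact ⟨by dsimp only; omega, by dsimp only; omega⟩

lemma inner1_eq (n m x y : Int) (tot : Int) (pr : Int × Int)
    (h2 : pr.2 - y ≠ 0) (h1 : pr.1 - x ≠ 0) :
    ctA_inner1 n m x y tot pr = tot + gA1 n m x y pr := by
  simp only [ctA_inner1]
  rw [foldl_count_abs n x (pr.2 - y) tot h2, foldl_count_abs' m y (pr.1 - x) _ h1]
  unfold gA1
  ring

lemma inner2_eq (n m x y : Int) (tot : Int) (pb : Int × Int) :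
    ctA_inner2 n m x y tot pb = tot + gA2 n m x y pb := by
  unfold ctA_inner2
  rw [foldl_ite_count]
  rfl

lemma cell_eq (n m x y t : Int) : ctA_cell n m x y t = ctB_cell n m x y t := by
  unfold ctA_cell ctB_cell
  rw [PySem.List.foldl_congr_mem _ (ctA_inner1 n m x y)
        (fun tot pr => tot + gA1 n m x y pr) t
        (fun tot pr hpr => by
          obtain ⟨h2, h1⟩ := knight_mem_ne x y pr (List.mem_filter.mp hpr).1
          exact inner1_eq n m x y tot pr h2 h1)]
  rw [PySem.List.foldl_congr_mem _ (ctA_inner2 n m x y)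
        (fun tot pb => tot + gA2 n m x y pb) _
        (fun tot pb _ => inner2_eq n m x y tot pb)]
  rw [PySem.List.foldl_add, PySem.List.foldl_add]
  -- B's loop
  rw [PySem.List.foldl_congr_mem _ (ctB_step n m x y)
        (fun tot d => if pB n m x y d then tot + gB n m x y d else tot) t
        (fun tot d _ => hstep n m x y tot d)]
  rw [PySem.List.foldl_if_eq_foldl_filter (pB n m x y) (fun tot d => tot + gB n m x y d),
      PySem.List.foldl_add]
  -- bridge the two sides
  have hscnd : ctA_scnd x y = ctKnight.map (fun d : Int × Int => (x + d.1, y + d.2)) := rfl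
  rw [hscnd, List.filter_map,
      List.filter_congr (q := pB n m x y) (fun d _ => by
        refine Bool.eq_iff_iff.mpr ?_
        simp only [Function.comp_apply, ctA_bounds, pB, Bool.and_eq_true, decide_eq_true_eq]
        omega),
      List.map_map, List.map_map]
  have hsum : ((ctKnight.filter (pB n m x y)).map
                (gA1 n m x y ∘ fun d : Int × Int => (x + d.1, y + d.2))).sum
            + ((ctKnight.filter (pB n m x y)).map
                (gA2 n m x y ∘ fun d : Int × Int => (x + d.1, y + d.2))).sum
            = ((ctKnight.filter (pB n m x y)).map (gB n m x y)).sum := by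
    rw [← PySem.List.sum_map_add_int]
    refine congrArg List.sum (List.map_congr_left (fun d _ => ?_))
    simp only [Function.comp_apply]
    unfold gB
    congr 1
    -- the two bishop counts coincide
    unfold gA2
    have hthrd : ctA_thrd (x + d.1, y + d.2)
        = ctBishop.map (fun e : Int × Int => (x + d.1 + e.1, y + d.2 + e.2)) := rfl
    rw [hthrd, List.filter_map, List.countP_map, List.countP_filter]
    exact congrArg (fun k : Nat => (k : Int)) (List.countP_congr (fun e _ => by
      simp only [Function.comp_apply, ctA_bounds, Bool.and_eq_true, decide_eq_true_eq]
      omega))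
  omega

theorem chess_triangle_spec_aux (n m : Int) : chess_triangle n m = chess_triangle_alt n m := by
  unfold chess_triangle chess_triangle_alt
  simp only [cell_eq]

-- ===== VERDICT (by name: the statement is the Claim_ definition above) =====
theorem chess_triangle_spec : Claim_equal_chess_triangle := by
  intro n m _
  unfold Spec_chess_triangle
  exact chess_triangle_spec_aux n m
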